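-- pv_equiv track=rewrite | github.com/stephenfeagin/adventofcode | python/2018/05/day_05.py | part_1
-- ===== SOURCE A (Python) =====
-- from typing import List, Set
--
-- def part_1(polymer: str) -> int:
--     """
--     How many units remain after fully reacting the polymer you scanned?
--
--     This answer is shamelessly copied from a post by Reddit user eltrufas.
--     I had originally solved this using the method shown below in this
--     docstring, which worked fine but would crash when attempting to use it in
--     part 2 (MemoryError).
--
--     i: int = 0
--
--     # Go to len(polymer) - 1 to allow for using i+1
--     while i < (len(polymer) - 1):
--         # If the two letters match except for case, then drop those them
--         # You then have to decrement i by 1 to allow for the possibility that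
--         # i-1 == i+2, which are now adjacent
--         if polymer[i].swapcase() == polymer[i + 1]:
--             polymer = polymer[:i] + polymer[i + 2 :]
--             i -= 1
--         else:
--             i += 1
--     return len(polymer)
--     """
--
--     # Initialize an empty list to hold the characters that will be in the
--     # final polymer
--     result: List[str] = []
--
--     # For each character, check if the result list is empty.
--     # If it's not empty and the last item in it is equal to the opposite case
--     # of the character, remove the last item from results and move on to the
--     # next character.
--     # Otherwise, append the character to the end of the results vector.
--     for char in polymer:
--         if result and char == result[-1].swapcase():
--             result.pop()
--
--         else:
--             result.append(char)
--
--     return len(result)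
-- ===== SOURCE B (Python) =====
-- def part_1(polymer: str) -> int:
--     # Repeated-scan reducer: walk an index over the working list, deleting
--     # reactive adjacent pairs in place and stepping back after each deletion.
--     p = list(polymer)
--     i = 0
--     while i < len(p) - 1:
--         if p[i].swapcase() == p[i + 1]:
--             del p[i:i + 2]
--             i = max(i - 1, 0)
--         else:
--             i += 1
--     return len(p)
-- ===== Notes on version B (the rewrite author's own statement) =====
-- stated objective: alternative
-- what changed: Replaces A's one-pass stack (append/pop on a result list) with an in-place repeated-scan reducer that deletes reactive pairs from the working list and backtracks the index; equivalence rests on the loop prefix being exactly A's stack.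
import Mathlib
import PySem

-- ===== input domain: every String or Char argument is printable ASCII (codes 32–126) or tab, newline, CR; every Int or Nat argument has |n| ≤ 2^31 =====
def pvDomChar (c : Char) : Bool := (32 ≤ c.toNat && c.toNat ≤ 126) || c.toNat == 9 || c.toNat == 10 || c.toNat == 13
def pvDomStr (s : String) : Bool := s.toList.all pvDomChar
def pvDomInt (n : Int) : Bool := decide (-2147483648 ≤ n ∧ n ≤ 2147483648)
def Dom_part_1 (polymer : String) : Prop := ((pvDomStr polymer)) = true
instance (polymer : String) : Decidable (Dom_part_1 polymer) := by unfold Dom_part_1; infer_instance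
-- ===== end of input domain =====

-- B is an alternative algorithm (in-place repeated scan with backtracking index), not faster; A is the single-pass stack.

-- str.swapcase() for one character, exact on ASCII (the stated domain)
def pvSwapcase (c : Char) : Char :=
  if c.isUpper then c.toLower else if c.isLower then c.toUpper else c

-- ===== PORT A =====
-- body of A's for-loop: pop the last result char if it reacts, else append
def aStep (result : List Char) (char : Char) : List Char :=
  if result ≠ [] ∧ char = pvSwapcase result.getLast! then result.dropLast
  else result ++ [char]

def part_1 (polymer : String) : Int :=
  ((polymer.toList.foldl aStep []).length : Int)

-- ===== PORT B =====
-- the while-loop of Source B: i is clamped at 0 (i = max(i-1,0)), matching Nat subtraction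
def bLoop (p : List Char) (i : Nat) : List Char :=
  if h : i + 1 < p.length then
    if pvSwapcase p[i]! = p[i + 1]! then
      bLoop (p.take i ++ p.drop (i + 2)) (i - 1)
    else
      bLoop p (i + 1)
  else p
termination_by 2 * p.length - i
decreasing_by
  · have hlen : (p.take i ++ p.drop (i + 2)).length = p.length - 2 := by
      simp only [List.length_append, List.length_take, List.length_drop]; omega
    omega
  · omega

def part_1_alt (polymer : String) : Int :=
  ((bLoop polymer.toList 0).length : Int)

-- ===== PRECONDITION & SPEC =====
def Spec_part_1 (polymer : String) (out : Int) : Prop := out = part_1_alt polymer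
instance (polymer : String) (out : Int) : Decidable (Spec_part_1 polymer out) := by unfold Spec_part_1; infer_instance

-- ===== CLAIM (what is proved, stated in full; the proofs are below) =====
def Claim_equal_part_1 : Prop := ∀ (polymer : String), Dom_part_1 polymer → Spec_part_1 polymer (part_1 polymer)

-- ===== LEMMAS AND PROOFS =====

-- starting the fold with the first char pre-pushed is the same as starting empty
lemma foldl_aStep_head (l : List Char) :
    List.foldl aStep [] l = List.foldl aStep (l.take 1) (l.drop 1) := by
  cases l with
  | nil => rfl
  | cons c t => simp [aStep]

lemma getLast!_eq_getLast {α : Type} [Inhabited α] (l : List α) (h : l ≠ []) :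
    l.getLast! = l.getLast h := by
  cases l with
  | nil => exact absurd rfl h
  | cons a as => rfl

lemma getLast!_take (p : List Char) (i : Nat) (h : i < p.length) :
    (p.take (i + 1)).getLast! = p[i] := by
  have hne : p.take (i + 1) ≠ [] := by
    rw [← List.length_pos_iff]
    simp only [List.length_take]
    omega
  rw [getLast!_eq_getLast _ hne, List.getLast_eq_getElem]
  have hl : (p.take (i + 1)).length = i + 1 := by
    simp only [List.length_take]; omega
  simp [hl, List.getElem_take]

-- invariant: the scanned prefix p[:i+1] is exactly A's stack, p[i+1:] the pending input
lemma bLoop_eq_foldl (p : List Char) (i : Nat) :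
    bLoop p i = List.foldl aStep (p.take (i + 1)) (p.drop (i + 1)) := by
  fun_induction bLoop p i with
  | case1 p i h hc ih =>
    have hi : i < p.length := by omega
    have hgi : p[i]! = p[i] := by
      simp [List.getElem!_eq_getElem?_getD, List.getElem?_eq_getElem hi]
    have hgi1 : p[i + 1]! = p[i + 1] := by
      simp [List.getElem!_eq_getElem?_getD, List.getElem?_eq_getElem h]
    rw [hgi, hgi1] at hc
    rw [ih, List.drop_eq_getElem_cons h, List.foldl_cons]
    have hne : p.take (i + 1) ≠ [] := by
      rw [← List.length_pos_iff]
      simp only [List.length_take]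
      omega
    have hstep : aStep (p.take (i + 1)) p[i + 1] = p.take i := by
      unfold aStep
      rw [if_pos ⟨hne, by rw [getLast!_take p i hi, hc]⟩]
      rw [List.dropLast_eq_take]
      have hl : (p.take (i + 1)).length = i + 1 := by
        simp only [List.length_take]; omega
      rw [hl, Nat.add_sub_cancel, List.take_take]
      simp
    rw [hstep]
    cases i with
    | zero =>
      simp only [List.take_zero, List.nil_append, Nat.zero_sub]
      exact (foldl_aStep_head _).symm
    | succ j =>
      have hlt : (p.take (j + 1)).length = j + 1 := by
        simp only [List.length_take]; omega
      rw [Nat.succ_sub_one]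
      rw [List.take_append_of_le_length (by omega), List.take_take,
          List.drop_append_of_le_length (by omega), List.drop_take]
      simp
  | case2 p i h hc ih =>
    have hi : i < p.length := by omega
    have hgi : p[i]! = p[i] := by
      simp [List.getElem!_eq_getElem?_getD, List.getElem?_eq_getElem hi]
    have hgi1 : p[i + 1]! = p[i + 1] := by
      simp [List.getElem!_eq_getElem?_getD, List.getElem?_eq_getElem h]
    rw [hgi, hgi1] at hc
    rw [ih, List.drop_eq_getElem_cons h, List.foldl_cons]
    have hstep : aStep (p.take (i + 1)) p[i + 1] = p.take (i + 1 + 1) := by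
      unfold aStep
      rw [if_neg (by
        rintro ⟨-, hq⟩
        exact hc ((getLast!_take p i hi ▸ hq).symm))]
      rw [List.take_add_one (i := i + 1), List.getElem?_eq_getElem h]
      rfl
    rw [hstep]
  | case3 p i h =>
    rw [List.take_of_length_le (by omega), List.drop_eq_nil_of_le (by omega)]
    rfl

-- ===== VERDICT (by name: the statement is the Claim_ definition above) =====
theorem part_1_spec : Claim_equal_part_1 := by
  intro polymer _
  unfold Spec_part_1 part_1 part_1_alt
  rw [bLoop_eq_foldl, ← foldl_aStep_head]
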